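-- pv_equiv track=rewrite | github.com/dawoodaijaz97/Leetcode | earliest-finish-time-for-land-and-water-rides-i/solution.py | solve
-- ===== SOURCE A (Python) =====
-- def solve(landStartTime: list[int], landDuration: list[int], waterStartTime: list[int], waterDuration: list[int]) -> int:
--     min_finish_time = float('inf')
--
--     for l_start, l_duration in zip(landStartTime, landDuration):
--         l_end = l_start + l_duration
--         for w_start, w_duration in zip(waterStartTime, waterDuration):
--             if w_start >= l_end:
--                 finish_time = w_start + w_duration
--             else:
--                 finish_time = max(l_end, w_start) + w_duration
--             min_finish_time = min(min_finish_time, finish_time)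
--
--     for w_start, w_duration in zip(waterStartTime, waterDuration):
--         w_end = w_start + w_duration
--         for l_start, l_duration in zip(landStartTime, landDuration):
--             if l_start >= w_end:
--                 finish_time = l_start + l_duration
--             else:
--                 finish_time = max(w_end, l_start) + l_duration
--             min_finish_time = min(min_finish_time, finish_time)
--
--     return min_finish_time
-- ===== SOURCE B (Python) =====
-- def solve(landStartTime: list[int], landDuration: list[int], waterStartTime: list[int], waterDuration: list[int]) -> int:
--     mL = min(s + d for s, d in zip(landStartTime, landDuration))
--     mW = min(s + d for s, d in zip(waterStartTime, waterDuration))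
--     best_after_land = min(max(mL, s) + d for s, d in zip(waterStartTime, waterDuration))
--     best_after_water = min(max(mW, s) + d for s, d in zip(landStartTime, landDuration))
--     return min(best_after_land, best_after_water)
-- ===== Notes on version B (the rewrite author's own statement) =====
-- stated objective: faster
-- what changed: Replaces the two O(n*m) nested scans with precomputed minimal land-end and water-end times followed by one single pass over each list.
-- outside the precondition, e.g. on solve([], [1], [2], [3]): A returns inf, B raises ValueError
import Mathlib
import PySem

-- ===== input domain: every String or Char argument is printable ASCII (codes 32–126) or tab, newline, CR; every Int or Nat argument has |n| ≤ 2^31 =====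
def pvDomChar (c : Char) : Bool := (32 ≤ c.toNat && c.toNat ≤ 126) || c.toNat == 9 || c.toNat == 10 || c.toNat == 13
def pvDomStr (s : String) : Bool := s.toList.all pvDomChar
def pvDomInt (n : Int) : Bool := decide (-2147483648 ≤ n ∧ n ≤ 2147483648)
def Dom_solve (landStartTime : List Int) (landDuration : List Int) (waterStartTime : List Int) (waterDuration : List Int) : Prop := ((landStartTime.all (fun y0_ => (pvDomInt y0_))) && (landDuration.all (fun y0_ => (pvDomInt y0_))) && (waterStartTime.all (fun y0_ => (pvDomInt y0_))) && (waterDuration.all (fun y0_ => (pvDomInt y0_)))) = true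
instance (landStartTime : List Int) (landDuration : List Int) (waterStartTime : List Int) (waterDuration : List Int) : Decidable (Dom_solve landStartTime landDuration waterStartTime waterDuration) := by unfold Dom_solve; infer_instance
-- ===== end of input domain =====

-- B replaces A's two O(n*m) nested scans by precomputing the minimal land-end / water-end
-- time and doing one single pass over each list (objective: faster, asymptotic).

-- ===== PORT A =====
-- inner loop of A: for (s,d) in ps, compare s with the other ride's end time e,
-- fold the running minimum (Option Int models A's float('inf') start)
def innerA (ps : List (Int × Int)) (e : Int) (acc : Option Int) : Option Int :=
  ps.foldl (fun acc p =>
    let ft := if p.1 ≥ e then p.1 + p.2 else max e p.1 + p.2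
    some (match acc with | none => ft | some a => min a ft)) acc

def solve (landStartTime : List Int) (landDuration : List Int) (waterStartTime : List Int) (waterDuration : List Int) : Int :=
  let lp := landStartTime.zip landDuration
  let wp := waterStartTime.zip waterDuration
  let m1 := lp.foldl (fun acc l => innerA wp (l.1 + l.2) acc) (none : Option Int)
  let m2 := wp.foldl (fun acc w => innerA lp (w.1 + w.2) acc) m1
  m2.getD 0   -- the `none` (= float('inf')) case is excluded by Pre_solve

-- ===== PORT B =====
-- min(a, f p1, f p2, …) as Python's min over a generator, seeded with a
def minF (f : Int × Int → Int) (ps : List (Int × Int)) (a : Int) : Int :=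
  ps.foldl (fun a p => min a (f p)) a

-- Python's min over a nonempty generator ([] is excluded by Pre_solve)
def minOver (f : Int × Int → Int) (ps : List (Int × Int)) : Int :=
  match ps with
  | [] => 0
  | p :: r => minF f r (f p)

def solve_alt (landStartTime : List Int) (landDuration : List Int) (waterStartTime : List Int) (waterDuration : List Int) : Int :=
  let lp := landStartTime.zip landDuration
  let wp := waterStartTime.zip waterDuration
  let mL := minOver (fun p => p.1 + p.2) lp
  let mW := minOver (fun p => p.1 + p.2) wp
  let bw := minOver (fun p => max mL p.1 + p.2) wp
  let bl := minOver (fun p => max mW p.1 + p.2) lp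
  min bw bl

-- ===== PRECONDITION & SPEC =====
-- Pre_ excludes inputs where one of the zips is empty: there A returns float('inf'),
-- which is not an int, and B's min() raises ValueError.
def Pre_solve (landStartTime : List Int) (landDuration : List Int) (waterStartTime : List Int) (waterDuration : List Int) : Prop :=
  landStartTime ≠ [] ∧ landDuration ≠ [] ∧ waterStartTime ≠ [] ∧ waterDuration ≠ []
instance (landStartTime : List Int) (landDuration : List Int) (waterStartTime : List Int) (waterDuration : List Int) : Decidable (Pre_solve landStartTime landDuration waterStartTime waterDuration) := by unfold Pre_solve; infer_instance

def pvWitness_solve : List Int × List Int × List Int × List Int := ([0], [1], [2], [3])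

def Spec_solve (landStartTime : List Int) (landDuration : List Int) (waterStartTime : List Int) (waterDuration : List Int) (out : Int) : Prop := out = solve_alt landStartTime landDuration waterStartTime waterDuration
instance (landStartTime : List Int) (landDuration : List Int) (waterStartTime : List Int) (waterDuration : List Int) (out : Int) : Decidable (Spec_solve landStartTime landDuration waterStartTime waterDuration out) := by unfold Spec_solve; infer_instance

-- ===== CLAIM (what is proved, stated in full; the proofs are below) =====
def Claim_equal_solve : Prop := ∀ (landStartTime : List Int) (landDuration : List Int) (waterStartTime : List Int) (waterDuration : List Int), Dom_solve landStartTime landDuration waterStartTime waterDuration → Pre_solve landStartTime landDuration waterStartTime waterDuration → Spec_solve landStartTime landDuration waterStartTime waterDuration (solve landStartTime landDuration waterStartTime waterDuration)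

-- ===== LEMMAS AND PROOFS =====

-- A's branch simplifies: the finish time is always max e s + d
theorem ft_eq (e : Int) (p : Int × Int) :
    (if p.1 ≥ e then p.1 + p.2 else max e p.1 + p.2) = max e p.1 + p.2 := by
  split <;> omega

theorem innerA_some (ps : List (Int × Int)) (e a : Int) :
    innerA ps e (some a) = some (minF (fun p => max e p.1 + p.2) ps a) := by
  induction ps generalizing a with
  | nil => rfl
  | cons p r ih =>
    simp only [innerA, minF, List.foldl_cons] at *
    rw [ft_eq]
    exact ih _

theorem innerA_cons_none (p : Int × Int) (r : List (Int × Int)) (e : Int) :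
    innerA (p :: r) e none = some (minOver (fun q => max e q.1 + q.2) (p :: r)) := by
  have : innerA (p :: r) e none = innerA r e (some (max e p.1 + p.2)) := by
    simp only [innerA, List.foldl_cons, ft_eq]
  rw [this, innerA_some]
  rfl

theorem minF_min (f : Int × Int → Int) (ps : List (Int × Int)) (a b : Int) :
    minF f ps (min a b) = min a (minF f ps b) := by
  induction ps generalizing a b with
  | nil => rfl
  | cons p r ih =>
    simp only [minF, List.foldl_cons] at *
    rw [min_assoc, ih]

theorem minF_eq_min_minOver (f : Int × Int → Int) (p : Int × Int) (r : List (Int × Int)) (a : Int) :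
    minF f (p :: r) a = min a (minOver f (p :: r)) := by
  show minF f r (min a (f p)) = _
  rw [minF_min]; rfl

-- the fold over lp of "min with inner fold over wp" starting from some a
theorem foldA_some (xs ps : List (Int × Int)) (a : Int) :
    xs.foldl (fun acc l => innerA ps (l.1 + l.2) acc) (some a)
      = some (xs.foldl (fun a l => minF (fun p => max (l.1 + l.2) p.1 + p.2) ps a) a) := by
  induction xs generalizing a with
  | nil => rfl
  | cons x r ih =>
    simp only [List.foldl_cons, innerA_some]
    exact ih _

theorem minF_pointwise_min (f h : Int × Int → Int) (ps : List (Int × Int)) (a b : Int) :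
    minF (fun p => min (f p) (h p)) ps (min a b) = min (minF f ps a) (minF h ps b) := by
  induction ps generalizing a b with
  | nil => rfl
  | cons p r ih =>
    simp only [minF, List.foldl_cons] at *
    have : min (min a b) (min (f p) (h p)) = min (min a (f p)) (min b (h p)) := by omega
    rw [this, ih]

theorem minOver_g_min (c d : Int) (p : Int × Int) (r : List (Int × Int)) :
    min (minOver (fun q => max c q.1 + q.2) (p :: r)) (minOver (fun q => max d q.1 + q.2) (p :: r))
      = minOver (fun q => max (min c d) q.1 + q.2) (p :: r) := by
  have hpt : ∀ q : Int × Int, max (min c d) q.1 + q.2 = min (max c q.1 + q.2) (max d q.1 + q.2) := by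
    intro q; omega
  show min (minF _ r _) (minF _ r _) = minF (fun q => max (min c d) q.1 + q.2) r (max (min c d) p.1 + p.2)
  have h1 : (fun q : Int × Int => max (min c d) q.1 + q.2)
      = fun q => min (max c q.1 + q.2) (max d q.1 + q.2) := funext hpt
  rw [h1, hpt p, minF_pointwise_min]

-- key interchange: folding the inner one-pass minima over the outer list equals a single
-- pass over ps using the MINIMUM end time of the outer list
theorem keyC1 (xs : List (Int × Int)) (p : Int × Int) (r : List (Int × Int)) (c : Int) :
    xs.foldl (fun a l => minF (fun q => max (l.1 + l.2) q.1 + q.2) (p :: r) a)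
        (minOver (fun q => max c q.1 + q.2) (p :: r))
      = minOver (fun q => max (minF (fun l => l.1 + l.2) xs c) q.1 + q.2) (p :: r) := by
  induction xs generalizing c with
  | nil => rfl
  | cons x t ih =>
    simp only [List.foldl_cons]
    rw [minF_eq_min_minOver, minOver_g_min, ih]
    rfl

theorem foldl2_min_init (F : Int × Int → Int × Int → Int) (xs ps : List (Int × Int)) (a b : Int) :
    xs.foldl (fun a x => minF (F x) ps a) (min a b)
      = min a (xs.foldl (fun a x => minF (F x) ps a) b) := by
  induction xs generalizing a b with
  | nil => rfl
  | cons x t ih =>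
    simp only [List.foldl_cons]
    rw [minF_min, ih]

-- ===== VERDICT (by name: the statement is the Claim_ definition above) =====
theorem solve_spec : Claim_equal_solve := by
  intro lst ld wst wd _ hpre
  obtain ⟨h1, h2, h3, h4⟩ := hpre
  unfold Spec_solve solve solve_alt
  have hlp : lst.zip ld ≠ [] := by
    intro h; rcases List.zip_eq_nil_iff.mp h with h | h <;> [exact h1 h; exact h2 h]
  have hwp : wst.zip wd ≠ [] := by
    intro h; rcases List.zip_eq_nil_iff.mp h with h | h <;> [exact h3 h; exact h4 h]
  obtain ⟨l0, lr, hl⟩ := List.exists_cons_of_ne_nil hlp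
  obtain ⟨w0, wr, hw⟩ := List.exists_cons_of_ne_nil hwp
  rw [hl, hw]
  dsimp only
  have hm1 : List.foldl (fun acc l => innerA (w0 :: wr) (l.1 + l.2) acc) none (l0 :: lr)
      = some (minOver (fun q => max (minOver (fun l => l.1 + l.2) (l0 :: lr)) q.1 + q.2) (w0 :: wr)) := by
    rw [List.foldl_cons, innerA_cons_none, foldA_some, keyC1]
    rfl
  rw [hm1, foldA_some, List.foldl_cons, minF_eq_min_minOver,
      foldl2_min_init (fun w p => max (w.1 + w.2) p.1 + p.2)]
  have hm2 : List.foldl (fun a w => minF (fun p => max (w.1 + w.2) p.1 + p.2) (l0 :: lr) a)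
        (minOver (fun q => max (w0.1 + w0.2) q.1 + q.2) (l0 :: lr)) wr
      = minOver (fun q => max (minOver (fun w => w.1 + w.2) (w0 :: wr)) q.1 + q.2) (l0 :: lr) := by
    rw [keyC1 wr l0 lr (w0.1 + w0.2)]
    rfl
  rw [hm2]
  rfl
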